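-- pv_equiv track=rewrite | github.com/BecaLiang/stg-final- | pdf2db.py | get_customer_for_file
-- ===== SOURCE A (Python) =====
-- CUSTOMER_FILE_MAPPING = {
--     "ifm electronics": "ifm_purchasing guidline_vs06_pcb.pdf",
--     "Pilz GmbH & Co. KG": ["PILZ_LP-SPEZIFIKATION_V2.0_en.pdf", "datasheet explanation Example.pdf"],
--     "Sero GmbH": ["95.0011.0F_delivery specifications for pcbs.pdf",
--                   "Annex to 95.0011.0F_15-06-2012_signed CML.pdf",
--                   "ENG_SS_115-18829_1_General Delivery Specification.pdf"],
--     "Viessmann Elektronik GmbH": "KLH_4414808_05.pdf",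
--     "Zollner Elektronik AG": "D-13-00004_20200110 Rev 1_incl. Vendor Addendum_signed both sites.pdf",
--     "Deltec": ["DELTC-Grote_Scania_SNGL-badmark-160705.pdf",
--                "DELTEC-signed-140122_Annex to Hella-N67036-2013-01-29 for EMS signed by CML.pdf"],
--     "E.G.O. Produktion GmbH & Co. KG": "E.G.O. PCB delivery specification LV6000000_90.03300.404_Version 11.pdf"
-- }
--
-- def get_customer_for_file(file_name):
--     """Get customer name for a given file name."""
--     for customer, mapped_files in CUSTOMER_FILE_MAPPING.items():
--         if isinstance(mapped_files, list):
--             if file_name in mapped_files: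
--                 return customer
--         elif mapped_files == file_name:
--             return customer
--     return None
-- ===== SOURCE B (Python) =====
-- CUSTOMER_FILE_MAPPING = {
--     "ifm electronics": "ifm_purchasing guidline_vs06_pcb.pdf",
--     "Pilz GmbH & Co. KG": ["PILZ_LP-SPEZIFIKATION_V2.0_en.pdf", "datasheet explanation Example.pdf"],
--     "Sero GmbH": ["95.0011.0F_delivery specifications for pcbs.pdf",
--                   "Annex to 95.0011.0F_15-06-2012_signed CML.pdf",
--                   "ENG_SS_115-18829_1_General Delivery Specification.pdf"],
--     "Viessmann Elektronik GmbH": "KLH_4414808_05.pdf",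
--     "Zollner Elektronik AG": "D-13-00004_20200110 Rev 1_incl. Vendor Addendum_signed both sites.pdf",
--     "Deltec": ["DELTC-Grote_Scania_SNGL-badmark-160705.pdf",
--                "DELTEC-signed-140122_Annex to Hella-N67036-2013-01-29 for EMS signed by CML.pdf"],
--     "E.G.O. Produktion GmbH & Co. KG": "E.G.O. PCB delivery specification LV6000000_90.03300.404_Version 11.pdf"
-- }
--
-- # Prebuilt inverse index: file name -> customer (filenames are unique).
-- _FILE_TO_CUSTOMER = {
--     f: customer
--     for customer, files in CUSTOMER_FILE_MAPPING.items()
--     for f in (files if isinstance(files, list) else [files])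
-- }
--
-- def get_customer_for_file(file_name):
--     """Get customer name for a given file name."""
--     return _FILE_TO_CUSTOMER.get(file_name)
-- ===== Notes on version B (the rewrite author's own statement) =====
-- stated objective: idiomatic
-- what changed: Replaced the per-call loop over customers with list-membership scans by a module-level inverse dict (file name -> customer, built once from CUSTOMER_FILE_MAPPING) so the function is a single dict .get lookup.
import Mathlib
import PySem

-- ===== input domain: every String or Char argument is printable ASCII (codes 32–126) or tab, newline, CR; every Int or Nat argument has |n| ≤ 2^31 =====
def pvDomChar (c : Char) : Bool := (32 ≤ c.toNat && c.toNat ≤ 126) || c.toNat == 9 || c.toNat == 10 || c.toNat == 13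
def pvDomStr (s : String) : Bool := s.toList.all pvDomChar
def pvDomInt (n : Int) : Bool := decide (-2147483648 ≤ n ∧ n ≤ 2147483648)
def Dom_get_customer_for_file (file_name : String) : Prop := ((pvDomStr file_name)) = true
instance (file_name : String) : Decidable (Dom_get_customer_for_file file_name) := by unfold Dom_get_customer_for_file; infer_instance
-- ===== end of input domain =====

-- B replaces A's loop over customers (with per-entry membership scans) by a single
-- prebuilt inverse dictionary file → customer and one lookup (objective: idiomatic).

-- a dict value in CUSTOMER_FILE_MAPPING is either a single filename or a list of filenames
inductive StrOrList where
  | strV : String → StrOrList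
  | listV : List String → StrOrList
deriving DecidableEq, Repr

def CUSTOMER_FILE_MAPPING : List (String × StrOrList) := [
  ("ifm electronics", .strV "ifm_purchasing guidline_vs06_pcb.pdf"),
  ("Pilz GmbH & Co. KG", .listV ["PILZ_LP-SPEZIFIKATION_V2.0_en.pdf", "datasheet explanation Example.pdf"]),
  ("Sero GmbH", .listV ["95.0011.0F_delivery specifications for pcbs.pdf",
                  "Annex to 95.0011.0F_15-06-2012_signed CML.pdf",
                  "ENG_SS_115-18829_1_General Delivery Specification.pdf"]),
  ("Viessmann Elektronik GmbH", .strV "KLH_4414808_05.pdf"),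
  ("Zollner Elektronik AG", .strV "D-13-00004_20200110 Rev 1_incl. Vendor Addendum_signed both sites.pdf"),
  ("Deltec", .listV ["DELTC-Grote_Scania_SNGL-badmark-160705.pdf",
               "DELTEC-signed-140122_Annex to Hella-N67036-2013-01-29 for EMS signed by CML.pdf"]),
  ("E.G.O. Produktion GmbH & Co. KG", .strV "E.G.O. PCB delivery specification LV6000000_90.03300.404_Version 11.pdf")]

-- ===== PORT A =====
-- the for-loop over CUSTOMER_FILE_MAPPING.items() with early return
def pvLoopA (file_name : String) : List (String × StrOrList) → Option String
  | [] => none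
  | (customer, mapped_files) :: rest =>
    match mapped_files with
    | .listV fs => if fs.contains file_name then some customer else pvLoopA file_name rest
    | .strV s => if s == file_name then some customer else pvLoopA file_name rest

def get_customer_for_file (file_name : String) : Option String :=
  pvLoopA file_name CUSTOMER_FILE_MAPPING

-- ===== PORT B =====
-- the module-level dict comprehension building the inverse index file → customer
def FILE_TO_CUSTOMER : PySem.Dict String String :=
  CUSTOMER_FILE_MAPPING.foldl
    (fun d cf =>
      (match cf.2 with | .listV fs => fs | .strV s => [s]).foldl
        (fun d f => d.insert f cf.1) d)
    PySem.Dict.empty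

def get_customer_for_file_alt (file_name : String) : Option String :=
  FILE_TO_CUSTOMER.get? file_name

-- ===== PRECONDITION & SPEC =====
def Spec_get_customer_for_file (file_name : String) (out : Option String) : Prop := out = get_customer_for_file_alt file_name
instance (file_name : String) (out : Option String) : Decidable (Spec_get_customer_for_file file_name out) := by unfold Spec_get_customer_for_file; infer_instance

-- ===== CLAIM (what is proved, stated in full; the proofs are below) =====
def Claim_equal_get_customer_for_file : Prop := ∀ (file_name : String), Dom_get_customer_for_file file_name → Spec_get_customer_for_file file_name (get_customer_for_file file_name)

-- ===== LEMMAS AND PROOFS =====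
-- the inverse index evaluated to its literal association list
set_option maxHeartbeats 1000000 in
theorem FILE_TO_CUSTOMER_eval : FILE_TO_CUSTOMER = PySem.Dict.mk [
  ("ifm_purchasing guidline_vs06_pcb.pdf", "ifm electronics"),
  ("PILZ_LP-SPEZIFIKATION_V2.0_en.pdf", "Pilz GmbH & Co. KG"),
  ("datasheet explanation Example.pdf", "Pilz GmbH & Co. KG"),
  ("95.0011.0F_delivery specifications for pcbs.pdf", "Sero GmbH"),
  ("Annex to 95.0011.0F_15-06-2012_signed CML.pdf", "Sero GmbH"),
  ("ENG_SS_115-18829_1_General Delivery Specification.pdf", "Sero GmbH"),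
  ("KLH_4414808_05.pdf", "Viessmann Elektronik GmbH"),
  ("D-13-00004_20200110 Rev 1_incl. Vendor Addendum_signed both sites.pdf", "Zollner Elektronik AG"),
  ("DELTC-Grote_Scania_SNGL-badmark-160705.pdf", "Deltec"),
  ("DELTEC-signed-140122_Annex to Hella-N67036-2013-01-29 for EMS signed by CML.pdf", "Deltec"),
  ("E.G.O. PCB delivery specification LV6000000_90.03300.404_Version 11.pdf", "E.G.O. Produktion GmbH & Co. KG")] := by decide

-- ===== VERDICT (by name: the statement is the Claim_ definition above) =====
set_option maxHeartbeats 2000000 in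
theorem get_customer_for_file_spec : Claim_equal_get_customer_for_file := by
  intro f _
  unfold Spec_get_customer_for_file get_customer_for_file get_customer_for_file_alt
  rw [FILE_TO_CUSTOMER_eval]
  by_cases h1 : f = "ifm_purchasing guidline_vs06_pcb.pdf"
  · subst h1; decide
  by_cases h2 : f = "PILZ_LP-SPEZIFIKATION_V2.0_en.pdf"
  · subst h2; decide
  by_cases h3 : f = "datasheet explanation Example.pdf"
  · subst h3; decide
  by_cases h4 : f = "95.0011.0F_delivery specifications for pcbs.pdf"
  · subst h4; decide
  by_cases h5 : f = "Annex to 95.0011.0F_15-06-2012_signed CML.pdf"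
  · subst h5; decide
  by_cases h6 : f = "ENG_SS_115-18829_1_General Delivery Specification.pdf"
  · subst h6; decide
  by_cases h7 : f = "KLH_4414808_05.pdf"
  · subst h7; decide
  by_cases h8 : f = "D-13-00004_20200110 Rev 1_incl. Vendor Addendum_signed both sites.pdf"
  · subst h8; decide
  by_cases h9 : f = "DELTC-Grote_Scania_SNGL-badmark-160705.pdf"
  · subst h9; decide
  by_cases h10 : f = "DELTEC-signed-140122_Annex to Hella-N67036-2013-01-29 for EMS signed by CML.pdf"
  · subst h10; decide
  by_cases h11 : f = "E.G.O. PCB delivery specification LV6000000_90.03300.404_Version 11.pdf"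
  · subst h11; decide
  have r1 : ("ifm_purchasing guidline_vs06_pcb.pdf" == f) = false := beq_eq_false_iff_ne.mpr (Ne.symm h1)
  have s2 : (f == "PILZ_LP-SPEZIFIKATION_V2.0_en.pdf") = false := beq_eq_false_iff_ne.mpr h2
  have r2 : ("PILZ_LP-SPEZIFIKATION_V2.0_en.pdf" == f) = false := beq_eq_false_iff_ne.mpr (Ne.symm h2)
  have s3 : (f == "datasheet explanation Example.pdf") = false := beq_eq_false_iff_ne.mpr h3
  have r3 : ("datasheet explanation Example.pdf" == f) = false := beq_eq_false_iff_ne.mpr (Ne.symm h3)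
  have s4 : (f == "95.0011.0F_delivery specifications for pcbs.pdf") = false := beq_eq_false_iff_ne.mpr h4
  have r4 : ("95.0011.0F_delivery specifications for pcbs.pdf" == f) = false := beq_eq_false_iff_ne.mpr (Ne.symm h4)
  have s5 : (f == "Annex to 95.0011.0F_15-06-2012_signed CML.pdf") = false := beq_eq_false_iff_ne.mpr h5
  have r5 : ("Annex to 95.0011.0F_15-06-2012_signed CML.pdf" == f) = false := beq_eq_false_iff_ne.mpr (Ne.symm h5)
  have s6 : (f == "ENG_SS_115-18829_1_General Delivery Specification.pdf") = false := beq_eq_false_iff_ne.mpr h6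
  have r6 : ("ENG_SS_115-18829_1_General Delivery Specification.pdf" == f) = false := beq_eq_false_iff_ne.mpr (Ne.symm h6)
  have r7 : ("KLH_4414808_05.pdf" == f) = false := beq_eq_false_iff_ne.mpr (Ne.symm h7)
  have r8 : ("D-13-00004_20200110 Rev 1_incl. Vendor Addendum_signed both sites.pdf" == f) = false := beq_eq_false_iff_ne.mpr (Ne.symm h8)
  have s9 : (f == "DELTC-Grote_Scania_SNGL-badmark-160705.pdf") = false := beq_eq_false_iff_ne.mpr h9
  have r9 : ("DELTC-Grote_Scania_SNGL-badmark-160705.pdf" == f) = false := beq_eq_false_iff_ne.mpr (Ne.symm h9)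
  have s10 : (f == "DELTEC-signed-140122_Annex to Hella-N67036-2013-01-29 for EMS signed by CML.pdf") = false := beq_eq_false_iff_ne.mpr h10
  have r10 : ("DELTEC-signed-140122_Annex to Hella-N67036-2013-01-29 for EMS signed by CML.pdf" == f) = false := beq_eq_false_iff_ne.mpr (Ne.symm h10)
  have r11 : ("E.G.O. PCB delivery specification LV6000000_90.03300.404_Version 11.pdf" == f) = false := beq_eq_false_iff_ne.mpr (Ne.symm h11)
  simp only [CUSTOMER_FILE_MAPPING, pvLoopA, List.contains, List.elem,
    PySem.Dict.get?_mk_cons, s2, s3, s4, s5, s6, s9, s10, r1, r2, r3, r4, r5, r6, r7, r8, r9, r10, r11]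
  rfl
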